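-- pv_equiv track=rewrite | github.com/MaissaneBJ/P-le_projet_Recommandation | final-AltMin-clean.py | generate_dict
-- ===== SOURCE A (Python) =====
-- def generate_dict(Y,m,n):
--
--     dict_i={}
--     dict_j={}
--     for i in range(m):
--         dict_i[i]={}
--         for j in range(n):
--             if (i,j) in Y:
--                 dict_i[i][j]=Y[(i,j)]
--     for j in range(n):
--         dict_j[j]={}
--         for i in range(m):
--             if (i,j) in Y:
--                 dict_j[j][i]=Y[(i,j)]
--     return dict_i, dict_j
-- ===== SOURCE B (Python) =====
-- def _fill(size, items, other):
--     d = {k: {} for k in range(size)}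
--     for a, b, v in items:
--         if 0 <= a < size and 0 <= b < other:
--             d[a][b] = v
--     return d
--
--
-- def generate_dict(Y, m, n):
--     items = sorted(((i, j, v) for (i, j), v in Y.items()), key=lambda t: t[1])
--     items_t = sorted(((j, i, v) for (i, j), v in Y.items()), key=lambda t: t[1])
--     return _fill(m, items, n), _fill(n, items_t, m)
-- ===== Notes on version B (the rewrite author's own statement) =====
-- stated objective: faster
-- what changed: A probes Y for every (i,j) in range(m) x range(n) twice (O(m*n) membership tests); B pre-initialises the row/column dicts over the ranges and makes one pass over Y's entries (sorted by the inner key to reproduce A's inner insertion order), O(m + n + |Y| log |Y|).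
import Mathlib
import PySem

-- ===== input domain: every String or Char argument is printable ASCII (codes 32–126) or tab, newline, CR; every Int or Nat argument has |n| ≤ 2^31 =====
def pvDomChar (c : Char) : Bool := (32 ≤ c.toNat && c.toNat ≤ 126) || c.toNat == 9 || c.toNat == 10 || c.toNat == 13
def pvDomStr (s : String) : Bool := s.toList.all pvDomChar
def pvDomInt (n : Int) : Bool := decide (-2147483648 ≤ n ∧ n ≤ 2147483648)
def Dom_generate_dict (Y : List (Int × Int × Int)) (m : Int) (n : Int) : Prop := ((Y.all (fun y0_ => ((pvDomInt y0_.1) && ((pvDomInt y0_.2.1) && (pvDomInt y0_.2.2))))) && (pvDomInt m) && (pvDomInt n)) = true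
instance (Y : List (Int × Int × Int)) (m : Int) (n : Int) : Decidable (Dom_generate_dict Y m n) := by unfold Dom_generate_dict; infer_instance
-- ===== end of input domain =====

-- B replaces A's m·n membership probes into Y by ONE pass over Y's entries (sorted by the inner key) into
-- pre-initialised row/column dicts: an alternative single-pass algorithm over the same data.

-- ===== PORT A =====
-- `(i, j) in Y` / `Y[(i,j)]` on the assoc-list encoding of the dict Y: first matching key.
def yget? (Y : List (Int × Int × Int)) (i j : Int) : Option Int :=
  match Y with
  | [] => none
  | t :: r => if t.1 = i ∧ t.2.1 = j then some t.2.2 else yget? r i j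

-- A's two loops are literal copies of each other with the axes swapped; this is the common loop:
-- for a in range(size): d[a] = {}; for b in range(other): if get(a,b) present: d[a][b] = that value.
def buildLoop (size other : Int) (get : Int → Int → Option Int) :
    PySem.Dict Int (PySem.Dict Int Int) :=
  (PySem.List.pyRange 0 size).foldl
    (fun d a =>
      (PySem.List.pyRange 0 other).foldl
        (fun d b =>
          if (get a b).isSome then
            d.modify a PySem.Dict.empty (fun r => r.insert b ((get a b).getD 0))
          else d)
        (d.insert a PySem.Dict.empty))
    PySem.Dict.empty

def generate_dict (Y : List (Int × Int × Int)) (m : Int) (n : Int) :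
    (List (Int × List (Int × Int))) × (List (Int × List (Int × Int))) :=
  let dict_i := buildLoop m n (fun i j => yget? Y i j)
  let dict_j := buildLoop n m (fun j i => yget? Y i j)
  (dict_i.items.map (fun p => (p.1, p.2.items)), dict_j.items.map (fun p => (p.1, p.2.items)))

-- ===== PORT B =====
-- d = {k: {} for k in range(size)}; for (a, b, v) in items: if 0<=a<size and 0<=b<other: d[a][b] = v
def fillRows (size : Int) (items : List (Int × Int × Int)) (other : Int) :
    List (Int × List (Int × Int)) :=
  let d0 : PySem.Dict Int (PySem.Dict Int Int) :=
    (PySem.List.pyRange 0 size).foldl (fun d k => d.insert k PySem.Dict.empty) PySem.Dict.empty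
  let d := items.foldl
    (fun d t =>
      if 0 ≤ t.1 ∧ t.1 < size ∧ 0 ≤ t.2.1 ∧ t.2.1 < other then
        d.modify t.1 PySem.Dict.empty (fun r => r.insert t.2.1 t.2.2)
      else d) d0
  d.items.map (fun p => (p.1, p.2.items))

def generate_dict_alt (Y : List (Int × Int × Int)) (m : Int) (n : Int) :
    (List (Int × List (Int × Int))) × (List (Int × List (Int × Int))) :=
  let items := PySem.List.sorted Y (fun t => t.2.1)
  let items_t := PySem.List.sorted (Y.map (fun t => (t.2.1, t.1, t.2.2))) (fun t => t.2.1)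
  (fillRows m items n, fillRows n items_t m)

-- ===== PRECONDITION & SPEC =====
-- Pre_ excludes assoc lists carrying the same (i, j) key twice: no Python dict is encoded by them, and which
-- of the duplicate values counts is an accident of the encoding (A's port reads the first, B's the last).
def Pre_generate_dict (Y : List (Int × Int × Int)) (m : Int) (n : Int) : Prop :=
  (Y.map (fun t => (t.1, t.2.1))).Nodup
instance (Y : List (Int × Int × Int)) (m : Int) (n : Int) : Decidable (Pre_generate_dict Y m n) := by
  unfold Pre_generate_dict; infer_instance

def pvWitness_generate_dict : (List (Int × Int × Int)) × Int × Int := ([(0, 1, 5), (1, 0, 3)], 2, 2)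

def Spec_generate_dict (Y : List (Int × Int × Int)) (m : Int) (n : Int)
    (out : (List (Int × List (Int × Int))) × (List (Int × List (Int × Int)))) : Prop :=
  out = generate_dict_alt Y m n
instance (Y : List (Int × Int × Int)) (m : Int) (n : Int)
    (out : (List (Int × List (Int × Int))) × (List (Int × List (Int × Int)))) :
    Decidable (Spec_generate_dict Y m n out) := by unfold Spec_generate_dict; infer_instance

-- ===== CLAIM (what is proved, stated in full; the proofs are below) =====
def Claim_equal_generate_dict : Prop := ∀ (Y : List (Int × Int × Int)) (m : Int) (n : Int), Dom_generate_dict Y m n → Pre_generate_dict Y m n → Spec_generate_dict Y m n (generate_dict Y m n)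

-- ===== LEMMAS AND PROOFS =====

-- the row loop A runs for a fixed outer key a
def rowA (get : Int → Int → Option Int) (a other : Int) : PySem.Dict Int Int :=
  (PySem.List.pyRange 0 other).foldl
    (fun r b => if (get a b).isSome then r.insert b ((get a b).getD 0) else r) PySem.Dict.empty

lemma yget?_swap (Y : List (Int × Int × Int)) (a b : Int) :
    yget? (Y.map (fun t => (t.2.1, t.1, t.2.2))) a b = yget? Y b a := by
  induction Y with
  | nil => rfl
  | cons t r ih => simp [yget?, ih, and_comm]

lemma yget?_eq_some_iff (Y : List (Int × Int × Int))
    (hk : (Y.map (fun t => (t.1, t.2.1))).Nodup) (a b v : Int) :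
    yget? Y a b = some v ↔ (a, b, v) ∈ Y := by
  induction Y with
  | nil => simp [yget?]
  | cons t r ih =>
    simp only [List.map_cons, List.nodup_cons] at hk
    obtain ⟨hnotin, hnd⟩ := hk
    by_cases h : t.1 = a ∧ t.2.1 = b
    · rw [yget?, if_pos h]
      constructor
      · intro hv
        have ht : t = (a, b, v) := by
          obtain ⟨t1, t21, t22⟩ := t
          obtain ⟨h1, h2⟩ := h
          simp only [Option.some.injEq] at hv
          simp_all
        rw [← ht]; exact List.mem_cons_self
      · intro hv
        rcases List.mem_cons.mp hv with he | hr
        · rw [← he] at h ⊢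
        · exact absurd (List.mem_map.mpr ⟨(a, b, v), hr, by simp [← h.1, ← h.2]⟩) hnotin
    · rw [yget?, if_neg h, ih hnd]
      constructor
      · exact fun hr => List.mem_cons_of_mem _ hr
      · intro hv
        rcases List.mem_cons.mp hv with he | hr
        · exact absurd ⟨by rw [← he], by rw [← he]⟩ h
        · exact hr

lemma innerA_getD (get : Int → Int → Option Int) (a : Int) (bs : List Int)
    (d : PySem.Dict Int (PySem.Dict Int Int)) (k' : Int) :
    (bs.foldl
      (fun d b =>
        if (get a b).isSome then
          d.modify a PySem.Dict.empty (fun r => r.insert b ((get a b).getD 0))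
        else d) d).getD k' PySem.Dict.empty
    = if k' = a then
        bs.foldl (fun r b => if (get a b).isSome then r.insert b ((get a b).getD 0) else r)
          (d.getD a PySem.Dict.empty)
      else d.getD k' PySem.Dict.empty := by
  induction bs generalizing d with
  | nil =>
    simp only [List.foldl_nil]
    split_ifs with h
    · rw [h]
    · rfl
  | cons b bs ih =>
    rw [List.foldl_cons, List.foldl_cons, ih]
    by_cases hs : (get a b).isSome = true
    · split_ifs with h
      · simp
      · simp [PySem.Dict.getD_modify, h]
    · simp [hs]

lemma innerA_keys (get : Int → Int → Option Int) (a : Int) (bs : List Int)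
    (d : PySem.Dict Int (PySem.Dict Int Int)) (h : d.contains a = true) :
    (bs.foldl
      (fun d b =>
        if (get a b).isSome then
          d.modify a PySem.Dict.empty (fun r => r.insert b ((get a b).getD 0))
        else d) d).keys = d.keys := by
  induction bs generalizing d h with
  | nil => rfl
  | cons b bs ih =>
    rw [List.foldl_cons]
    by_cases hs : (get a b).isSome = true
    · rw [if_pos hs,
        ih _ (by simp [PySem.Dict.contains_modify]),
        PySem.Dict.keys_modify, PySem.Dict.keys_insert_of_contains _ _ h]
    · rw [if_neg hs]; exact ih d h

lemma keys_insert_eq_add (d : PySem.Dict Int (PySem.Dict Int Int)) (k : Int)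
    (v : PySem.Dict Int Int) : (d.insert k v).keys = PySem.Set.add d.keys k := by
  by_cases h : d.contains k = true
  · have hm : k ∈ d.keys := (PySem.Dict.contains_iff_mem_keys d k).mp h
    rw [PySem.Dict.keys_insert_of_contains _ _ h]
    simp [PySem.Set.add, PySem.Set.contains, hm]
  · have h' : d.contains k = false := by simpa using h
    have hm : k ∉ d.keys := fun hmm => by
      simp [(PySem.Dict.contains_iff_mem_keys d k).mpr hmm] at h'
    rw [PySem.Dict.keys_insert_of_not_contains _ _ h']
    simp [PySem.Set.add, PySem.Set.contains, hm]

lemma set_update_append (s : List Int) (l : List Int) (h : (s ++ l).Nodup) :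
    PySem.Set.update s l = s ++ l := by
  induction l generalizing s with
  | nil => simp [PySem.Set.update]
  | cons x l ih =>
    have hx : x ∉ s := by
      intro hmm
      have := List.disjoint_of_nodup_append h
      exact this hmm List.mem_cons_self
    have hadd : PySem.Set.add s x = s ++ [x] := by
      simp [PySem.Set.add, PySem.Set.contains, hx]
    show PySem.Set.update (PySem.Set.add s x) l = s ++ x :: l
    rw [hadd, ih (s ++ [x]) (by simpa using h)]
    simp

lemma set_update_nil_of_nodup (l : List Int) (h : l.Nodup) :
    PySem.Set.update ([] : List Int) l = l := by
  simpa using set_update_append [] l (by simpa using h)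

-- outer loop of A, abbreviated for the lemmas
def outerStep (other : Int) (get : Int → Int → Option Int)
    (d : PySem.Dict Int (PySem.Dict Int Int)) (a : Int) : PySem.Dict Int (PySem.Dict Int Int) :=
  (PySem.List.pyRange 0 other).foldl
    (fun d b =>
      if (get a b).isSome then
        d.modify a PySem.Dict.empty (fun r => r.insert b ((get a b).getD 0))
      else d)
    (d.insert a PySem.Dict.empty)

lemma buildLoop_eq_foldl (size other : Int) (get : Int → Int → Option Int) :
    buildLoop size other get
      = (PySem.List.pyRange 0 size).foldl (outerStep other get) PySem.Dict.empty := rfl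

lemma outer_keys (other : Int) (get : Int → Int → Option Int) (as : List Int) :
    ∀ d, ((as.foldl (outerStep other get) d).keys) = PySem.Set.update d.keys as := by
  induction as with
  | nil => intro d; rfl
  | cons a as ih =>
    intro d
    rw [List.foldl_cons, ih]
    have hstep : (outerStep other get d a).keys = PySem.Set.add d.keys a := by
      rw [outerStep, innerA_keys _ _ _ _ (by simp),
        keys_insert_eq_add]
    rw [hstep]
    rfl

lemma outer_getD_not_mem (other : Int) (get : Int → Int → Option Int) (as : List Int) :
    ∀ d a, a ∉ as →
      ((as.foldl (outerStep other get) d).getD a PySem.Dict.empty) = d.getD a PySem.Dict.empty := by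
  induction as with
  | nil => intro d a _; rfl
  | cons a' as ih =>
    intro d a hmem
    have hne : a ≠ a' := fun he => hmem (he ▸ List.mem_cons_self)
    have hnas : a ∉ as := fun hmm => hmem (List.mem_cons_of_mem _ hmm)
    rw [List.foldl_cons, ih _ _ hnas, outerStep, innerA_getD, if_neg hne,
      PySem.Dict.getD_insert]
    simp [hne]

lemma outer_getD_mem (other : Int) (get : Int → Int → Option Int) (as : List Int) :
    ∀ d a, as.Nodup → a ∈ as →
      ((as.foldl (outerStep other get) d).getD a PySem.Dict.empty) = rowA get a other := by
  induction as with
  | nil => intro d a _ hmem; exact absurd hmem (by simp)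
  | cons a' as ih =>
    intro d a hnd hmem
    rw [List.nodup_cons] at hnd
    rw [List.foldl_cons]
    rcases List.mem_cons.mp hmem with he | hmm
    · subst he
      have hnot : a ∉ as := hnd.1
      rw [outer_getD_not_mem other get as _ _ hnot, outerStep, innerA_getD, if_pos rfl,
        PySem.Dict.getD_insert]
      simp [rowA]
    · exact ih _ _ hnd.2 hmm

lemma initD_getD (ks : List Int) :
    ∀ (d : PySem.Dict Int (PySem.Dict Int Int)) (a : Int),
      ((ks.foldl (fun d k => d.insert k PySem.Dict.empty) d).getD a PySem.Dict.empty)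
        = if a ∈ ks then PySem.Dict.empty else d.getD a PySem.Dict.empty := by
  induction ks with
  | nil => intro d a; simp
  | cons k ks ih =>
    intro d a
    rw [List.foldl_cons, ih]
    by_cases h : a ∈ ks
    · simp [h]
    · simp [h, PySem.Dict.getD_insert, List.mem_cons]

lemma fillB_getD (size other : Int) (S : List (Int × Int × Int)) :
    ∀ (d : PySem.Dict Int (PySem.Dict Int Int)) (a : Int),
      ((S.foldl
        (fun d t =>
          if 0 ≤ t.1 ∧ t.1 < size ∧ 0 ≤ t.2.1 ∧ t.2.1 < other then
            d.modify t.1 PySem.Dict.empty (fun r => r.insert t.2.1 t.2.2)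
          else d) d).getD a PySem.Dict.empty)
      = (S.filter (fun t =>
            decide (0 ≤ t.1 ∧ t.1 < size ∧ 0 ≤ t.2.1 ∧ t.2.1 < other) && (t.1 == a))).foldl
          (fun r t => r.insert t.2.1 t.2.2) (d.getD a PySem.Dict.empty) := by
  induction S with
  | nil => intro d a; rfl
  | cons t S ih =>
    intro d a
    rw [List.foldl_cons, ih]
    by_cases hp : 0 ≤ t.1 ∧ t.1 < size ∧ 0 ≤ t.2.1 ∧ t.2.1 < other
    · rw [if_pos hp]
      by_cases ha : t.1 = a
      · have hcnd : (decide (0 ≤ t.1 ∧ t.1 < size ∧ 0 ≤ t.2.1 ∧ t.2.1 < other) && (t.1 == a)) = true := by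
          simp only [Bool.and_eq_true, decide_eq_true_eq, beq_iff_eq]; exact ⟨hp, ha⟩
        rw [List.filter_cons, if_pos hcnd, List.foldl_cons, PySem.Dict.getD_modify,
          if_pos ha.symm, ha]
      · have hcnd : ¬ ((decide (0 ≤ t.1 ∧ t.1 < size ∧ 0 ≤ t.2.1 ∧ t.2.1 < other) && (t.1 == a)) = true) := by
          simp only [Bool.and_eq_true, decide_eq_true_eq, beq_iff_eq]; exact fun hc => ha hc.2
        rw [List.filter_cons, if_neg hcnd, PySem.Dict.getD_modify,
          if_neg (fun hc : a = t.1 => ha hc.symm)]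
    · have hcnd : ¬ ((decide (0 ≤ t.1 ∧ t.1 < size ∧ 0 ≤ t.2.1 ∧ t.2.1 < other) && (t.1 == a)) = true) := by
        simp only [Bool.and_eq_true, decide_eq_true_eq, beq_iff_eq]; exact fun hc => hp hc.1
      rw [if_neg hp, List.filter_cons, if_neg hcnd]

lemma eq_of_pairwise_fst_lt (l1 l2 : List (Int × Int))
    (h1 : l1.Pairwise (fun p q => p.1 < q.1)) (h2 : l2.Pairwise (fun p q => p.1 < q.1))
    (hm : ∀ x, x ∈ l1 ↔ x ∈ l2) : l1 = l2 := by
  induction l1 generalizing l2 with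
  | nil =>
    cases l2 with
    | nil => rfl
    | cons q u => exact absurd ((hm q).mpr List.mem_cons_self) (by simp)
  | cons p t ih =>
    cases l2 with
    | nil => exact absurd ((hm p).mp List.mem_cons_self) (by simp)
    | cons q u =>
      rw [List.pairwise_cons] at h1 h2
      have hpq : p = q := by
        rcases List.mem_cons.mp ((hm p).mp List.mem_cons_self) with h | hpu
        · exact h
        rcases List.mem_cons.mp ((hm q).mpr List.mem_cons_self) with h | hqt
        · exact h.symm
        · have hlt1 : p.1 < q.1 := h1.1 q hqt
          have hlt2 : q.1 < p.1 := h2.1 p hpu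
          omega
      subst hpq
      have htail : ∀ x, x ∈ t ↔ x ∈ u := by
        intro x
        constructor
        · intro hx
          rcases List.mem_cons.mp ((hm x).mp (List.mem_cons_of_mem _ hx)) with he | hu
          · exact absurd (he ▸ h1.1 x hx) (lt_irrefl _)
          · exact hu
        · intro hx
          rcases List.mem_cons.mp ((hm x).mpr (List.mem_cons_of_mem _ hx)) with he | ht
          · exact absurd (he ▸ h2.1 x hx) (lt_irrefl _)
          · exact ht
      refine congrArg (List.cons p) ?_
      apply ih <;> first
        | exact h1.2
        | exact h2.2
        | exact htail

-- the two row item lists agree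
lemma row_items_eq (Z : List (Int × Int × Int)) (size other : Int)
    (hk : (Z.map (fun t => (t.1, t.2.1))).Nodup) (a : Int) (ha : 0 ≤ a ∧ a < size) :
    (rowA (fun i j => yget? Z i j) a other).items
      = (((PySem.List.sorted Z (fun t => t.2.1)).filter (fun t =>
            decide (0 ≤ t.1 ∧ t.1 < size ∧ 0 ≤ t.2.1 ∧ t.2.1 < other) && (t.1 == a))).foldl
          (fun r t => r.insert t.2.1 t.2.2) PySem.Dict.empty).items := by
  have hjs : ((PySem.List.pyRange 0 other).filter (fun b => (yget? Z a b).isSome)).Nodup :=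
    (PySem.List.nodup_pyRange_one 0 other).filter _
  have hL : (rowA (fun i j => yget? Z i j) a other).items
      = ((PySem.List.pyRange 0 other).filter (fun b => (yget? Z a b).isSome)).map
          (fun b => (b, (yget? Z a b).getD 0)) := by
    have e1 := PySem.List.foldl_if_eq_foldl_filter
      (p := fun b : Int => (yget? Z a b).isSome)
      (f := fun (r : PySem.Dict Int Int) (b : Int) => r.insert b ((yget? Z a b).getD 0))
      (l := PySem.List.pyRange 0 other) (init := (PySem.Dict.empty : PySem.Dict Int Int))
    have e2 := PySem.Dict.items_foldl_insert_fresh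
      ((PySem.List.pyRange 0 other).filter (fun b => (yget? Z a b).isSome))
      (fun b : Int => b) (fun b : Int => (yget? Z a b).getD 0)
      (PySem.Dict.empty : PySem.Dict Int Int)
      (by intro b _; exact PySem.Dict.contains_empty b) (by simpa using hjs)
    rw [rowA]
    have e3 := (congrArg PySem.Dict.items e1).trans e2
    simpa using e3
  -- distinct inner keys of the filtered sorted list
  have hkS : ((PySem.List.sorted Z (fun t => t.2.1)).map (fun t => (t.1, t.2.1))).Nodup :=
    (((PySem.List.sorted_perm Z (fun t => t.2.1) false).map (fun t => (t.1, t.2.1))).nodup_iff).mpr hk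
  have hkts : (((PySem.List.sorted Z (fun t => t.2.1)).filter (fun t =>
        decide (0 ≤ t.1 ∧ t.1 < size ∧ 0 ≤ t.2.1 ∧ t.2.1 < other) && (t.1 == a))).map
        (fun t => (t.1, t.2.1))).Nodup :=
    hkS.sublist (List.filter_sublist.map _)
  have hmem_a : ∀ t ∈ ((PySem.List.sorted Z (fun t => t.2.1)).filter (fun t =>
        decide (0 ≤ t.1 ∧ t.1 < size ∧ 0 ≤ t.2.1 ∧ t.2.1 < other) && (t.1 == a))), t.1 = a := by
    intro t ht
    have := (List.mem_filter.mp ht).2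
    simp only [Bool.and_eq_true, beq_iff_eq] at this
    exact this.2
  have hSnd : (((PySem.List.sorted Z (fun t => t.2.1)).filter (fun t =>
        decide (0 ≤ t.1 ∧ t.1 < size ∧ 0 ≤ t.2.1 ∧ t.2.1 < other) && (t.1 == a))).map
        (fun t => t.2.1)).Nodup := by
    have hcongr : (((PySem.List.sorted Z (fun t => t.2.1)).filter (fun t =>
          decide (0 ≤ t.1 ∧ t.1 < size ∧ 0 ≤ t.2.1 ∧ t.2.1 < other) && (t.1 == a))).map
          (fun t => (t.1, t.2.1)))
        = (((PySem.List.sorted Z (fun t => t.2.1)).filter (fun t =>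
          decide (0 ≤ t.1 ∧ t.1 < size ∧ 0 ≤ t.2.1 ∧ t.2.1 < other) && (t.1 == a))).map
          (fun t => t.2.1)).map (fun b => (a, b)) := by
      rw [List.map_map]
      exact List.map_congr_left (fun t ht => by simp [hmem_a t ht])
    rw [hcongr] at hkts
    exact hkts.of_map _
  have hR : (((PySem.List.sorted Z (fun t => t.2.1)).filter (fun t =>
        decide (0 ≤ t.1 ∧ t.1 < size ∧ 0 ≤ t.2.1 ∧ t.2.1 < other) && (t.1 == a))).foldl
        (fun r t => r.insert t.2.1 t.2.2) PySem.Dict.empty).items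
      = ((PySem.List.sorted Z (fun t => t.2.1)).filter (fun t =>
          decide (0 ≤ t.1 ∧ t.1 < size ∧ 0 ≤ t.2.1 ∧ t.2.1 < other) && (t.1 == a))).map
          (fun t => (t.2.1, t.2.2)) := by
    have e4 := PySem.Dict.items_foldl_insert_fresh
      ((PySem.List.sorted Z (fun t => t.2.1)).filter (fun t =>
        decide (0 ≤ t.1 ∧ t.1 < size ∧ 0 ≤ t.2.1 ∧ t.2.1 < other) && (t.1 == a)))
      (fun t : Int × Int × Int => t.2.1) (fun t : Int × Int × Int => t.2.2)
      (PySem.Dict.empty : PySem.Dict Int Int)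
      (by intro t _; exact PySem.Dict.contains_empty t.2.1) hSnd
    simpa using e4
  rw [hL, hR]
  -- pairwise on the first components
  apply eq_of_pairwise_fst_lt
  · exact List.pairwise_map.mpr
      (((PySem.List.pairwise_lt_pyRange_one 0 other).filter _).imp (fun h => h))
  · have hle : ((PySem.List.sorted Z (fun t => t.2.1)).filter (fun t =>
          decide (0 ≤ t.1 ∧ t.1 < size ∧ 0 ≤ t.2.1 ∧ t.2.1 < other) && (t.1 == a))).Pairwise
        (fun t u => t.2.1 ≤ u.2.1) :=
      (PySem.List.sorted_pairwise Z (fun t => t.2.1)).filter _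
    have hne : ((PySem.List.sorted Z (fun t => t.2.1)).filter (fun t =>
          decide (0 ≤ t.1 ∧ t.1 < size ∧ 0 ≤ t.2.1 ∧ t.2.1 < other) && (t.1 == a))).Pairwise
        (fun t u => t.2.1 ≠ u.2.1) := List.pairwise_map.mp hSnd
    exact List.pairwise_map.mpr ((hle.and hne).imp (fun h => lt_of_le_of_ne h.1 h.2))
  · intro x
    simp only [List.mem_map, List.mem_filter, PySem.List.mem_pyRange_one,
      PySem.List.mem_sorted, Bool.and_eq_true, decide_eq_true_eq, beq_iff_eq]
    constructor
    · rintro ⟨b, ⟨⟨hb0, hb1⟩, hsome⟩, hx⟩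
      obtain ⟨v, hv⟩ := Option.isSome_iff_exists.mp hsome
      refine ⟨(a, b, v), ⟨(yget?_eq_some_iff Z hk a b v).mp hv,
        ⟨⟨ha.1, ha.2, hb0, hb1⟩, rfl⟩⟩, ?_⟩
      rw [← hx]
      simp [hv]
    · rintro ⟨t, ⟨htZ, ⟨⟨_, _, h3, h4⟩, h5⟩⟩, hx⟩
      have htv : yget? Z a t.2.1 = some t.2.2 := by
        apply (yget?_eq_some_iff Z hk a t.2.1 t.2.2).mpr
        have : (a, t.2.1, t.2.2) = t := by
          obtain ⟨t1, t21, t22⟩ := t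
          simp only at h5
          simp [h5]
        rw [this]
        exact htZ
      refine ⟨t.2.1, ⟨⟨h3, h4⟩, by simp [htv]⟩, ?_⟩
      rw [← hx]
      simp [htv]

lemma fillB_keys (size other : Int) (S : List (Int × Int × Int)) :
    ∀ d : PySem.Dict Int (PySem.Dict Int Int),
      (∀ t ∈ S, (0 ≤ t.1 ∧ t.1 < size ∧ 0 ≤ t.2.1 ∧ t.2.1 < other) → d.contains t.1 = true) →
      (S.foldl
        (fun d t =>
          if 0 ≤ t.1 ∧ t.1 < size ∧ 0 ≤ t.2.1 ∧ t.2.1 < other then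
            d.modify t.1 PySem.Dict.empty (fun r => r.insert t.2.1 t.2.2)
          else d) d).keys = d.keys := by
  induction S with
  | nil => intro d _; rfl
  | cons t S ih =>
    intro d h
    rw [List.foldl_cons]
    by_cases hp : 0 ≤ t.1 ∧ t.1 < size ∧ 0 ≤ t.2.1 ∧ t.2.1 < other
    · rw [if_pos hp]
      have hc : d.contains t.1 = true := h t List.mem_cons_self hp
      have hkeys : (d.modify t.1 PySem.Dict.empty (fun r => r.insert t.2.1 t.2.2)).keys
          = d.keys := by
        rw [PySem.Dict.keys_modify, PySem.Dict.keys_insert_of_contains _ _ hc]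
      rw [ih _ ?_, hkeys]
      intro u hu hup
      rw [PySem.Dict.contains_modify]
      simp [h u (List.mem_cons_of_mem _ hu) hup]
    · rw [if_neg hp]
      exact ih d (fun u hu hup => h u (List.mem_cons_of_mem _ hu) hup)

lemma initD_keys (ks : List Int) (h : ks.Nodup) :
    ((ks.foldl (fun d k => d.insert k PySem.Dict.empty)
      (PySem.Dict.empty : PySem.Dict Int (PySem.Dict Int Int)))).keys = ks := by
  rw [PySem.Dict.keys_foldl_insert ks (fun _ _ => PySem.Dict.empty)]
  rw [PySem.Dict.keys_empty]
  exact set_update_nil_of_nodup ks h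

lemma main_eq (Z : List (Int × Int × Int)) (size other : Int)
    (hk : (Z.map (fun t => (t.1, t.2.1))).Nodup) :
    (buildLoop size other (fun a b => yget? Z a b)).items.map (fun p => (p.1, p.2.items))
      = fillRows size (PySem.List.sorted Z (fun t => t.2.1)) other := by
  have hrange : (PySem.List.pyRange 0 size).Nodup := PySem.List.nodup_pyRange_one 0 size
  have hkeysA : (buildLoop size other (fun a b => yget? Z a b)).keys
      = PySem.List.pyRange 0 size := by
    rw [buildLoop_eq_foldl, outer_keys, PySem.Dict.keys_empty]
    exact set_update_nil_of_nodup _ hrange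
  have hd0keys : ((PySem.List.pyRange 0 size).foldl (fun d k => d.insert k PySem.Dict.empty)
      (PySem.Dict.empty : PySem.Dict Int (PySem.Dict Int Int))).keys
      = PySem.List.pyRange 0 size := initD_keys _ hrange
  rw [fillRows]
  have hkeysB : (((PySem.List.sorted Z (fun t => t.2.1)).foldl
      (fun d t =>
        if 0 ≤ t.1 ∧ t.1 < size ∧ 0 ≤ t.2.1 ∧ t.2.1 < other then
          d.modify t.1 PySem.Dict.empty (fun r => r.insert t.2.1 t.2.2)
        else d)
      ((PySem.List.pyRange 0 size).foldl (fun d k => d.insert k PySem.Dict.empty)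
        PySem.Dict.empty)).keys) = PySem.List.pyRange 0 size := by
    rw [fillB_keys size other _ _ ?_, hd0keys]
    intro t _ hp
    apply (PySem.Dict.contains_iff_mem_keys _ _).mpr
    rw [hd0keys]
    exact PySem.List.mem_pyRange_one.mpr ⟨hp.1, hp.2.1⟩
  rw [PySem.Dict.items_eq_map_keys _ (by rw [hkeysA]; exact hrange) PySem.Dict.empty,
    PySem.Dict.items_eq_map_keys _ (by rw [hkeysB]; exact hrange) PySem.Dict.empty,
    hkeysA, hkeysB, List.map_map, List.map_map]
  apply List.map_congr_left
  intro k hkmem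
  have hbounds := PySem.List.mem_pyRange_one.mp hkmem
  simp only [Function.comp]
  congr 1
  rw [buildLoop_eq_foldl, outer_getD_mem other _ _ _ _ hrange hkmem,
    fillB_getD, initD_getD, if_pos hkmem]
  exact row_items_eq Z size other hk k ⟨hbounds.1, hbounds.2⟩

-- ===== VERDICT (by name: the statement is the Claim_ definition above) =====
theorem generate_dict_spec : Claim_equal_generate_dict := by
  intro Y m n _ hk
  unfold Spec_generate_dict generate_dict generate_dict_alt
  have hk2 : ((Y.map (fun t => (t.2.1, t.1, t.2.2))).map (fun t => (t.1, t.2.1))).Nodup := by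
    have : (Y.map (fun t => (t.2.1, t.1, t.2.2))).map (fun t => (t.1, t.2.1))
        = (Y.map (fun t => (t.1, t.2.1))).map Prod.swap := by
      simp [List.map_map]
    rw [this]
    exact hk.map (fun x y h => Prod.swap_injective h)
  have h2 : (fun j i => yget? Y i j) = (fun a b => yget? (Y.map (fun t => (t.2.1, t.1, t.2.2))) a b) := by
    funext a b; rw [yget?_swap]
  refine Prod.ext ?_ ?_
  · exact main_eq Y m n hk
  · show (buildLoop n m (fun j i => yget? Y i j)).items.map (fun p => (p.1, p.2.items)) = _
    rw [h2]
    exact main_eq (Y.map (fun t => (t.2.1, t.1, t.2.2))) n m hk2
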